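-- pv_equiv track=rewrite | github.com/Aadthiyan/solshield | benchmarking/performance_benchmark.py | _compare_vulnerabilities
-- ===== SOURCE A (Python) =====
-- from typing import Dict, List, Any, Optional, Tuple
--
-- def _compare_vulnerabilities(detected: List[Dict], expected: List[Dict]) -> Dict[str, int]:
--     """Compare detected vulnerabilities with expected ones."""
--     detected_types = {vuln.get("type", "").lower() for vuln in detected}
--     expected_types = {vuln.get("type", "").lower() for vuln in expected}
--
--     true_positives = len(detected_types.intersection(expected_types))
--     false_positives = len(detected_types - expected_types)
--     false_negatives = len(expected_types - detected_types)
--     true_negatives = 1 if not detected_types and not expected_types else 0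
--
--     return {
--         "true_positives": true_positives,
--         "false_positives": false_positives,
--         "false_negatives": false_negatives,
--         "true_negatives": true_negatives
--     }
-- ===== SOURCE B (Python) =====
-- def _compare_vulnerabilities(detected, expected):
--     """Merge both lists into one status dict (type -> tag), then count tags."""
--     status = {}
--     for vuln in detected:
--         status[vuln.get("type", "").lower()] = "d"
--     for vuln in expected:
--         t = vuln.get("type", "").lower()
--         if status.get(t) == "d":
--             status[t] = "b"
--         elif t not in status:
--             status[t] = "e"
--     tags = list(status.values())
--     return {
--         "true_positives": tags.count("b"),
--         "false_positives": tags.count("d"),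
--         "false_negatives": tags.count("e"),
--         "true_negatives": 1 if not status else 0,
--     }
-- ===== Notes on version B (the rewrite author's own statement) =====
-- stated objective: alternative
-- what changed: A builds two type sets and sizes their intersection and both differences; B builds no sets at all: it merges both lists into a single insertion-ordered status dict tagging each lowered type as detected-only/expected-only/both, then counts the tags.
import Mathlib
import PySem

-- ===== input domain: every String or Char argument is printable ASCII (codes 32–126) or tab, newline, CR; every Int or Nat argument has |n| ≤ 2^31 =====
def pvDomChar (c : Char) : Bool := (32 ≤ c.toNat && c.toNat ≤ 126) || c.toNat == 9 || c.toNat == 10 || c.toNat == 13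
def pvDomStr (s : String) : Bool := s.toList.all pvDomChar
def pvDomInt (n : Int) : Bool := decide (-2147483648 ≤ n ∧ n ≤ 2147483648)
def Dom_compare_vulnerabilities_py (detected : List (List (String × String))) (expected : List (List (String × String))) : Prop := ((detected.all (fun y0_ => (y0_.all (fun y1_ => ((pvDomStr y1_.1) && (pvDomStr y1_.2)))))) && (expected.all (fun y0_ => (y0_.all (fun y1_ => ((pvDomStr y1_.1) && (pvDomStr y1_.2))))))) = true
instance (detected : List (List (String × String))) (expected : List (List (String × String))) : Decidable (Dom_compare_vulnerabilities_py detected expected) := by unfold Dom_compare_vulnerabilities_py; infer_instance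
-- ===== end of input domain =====

-- ===== PORT A =====

-- B builds no sets: it merges both input lists into one status dict (type → tag d/b/e)
-- and counts the tags; objective: alternative decomposition, not speed.

-- ===== PORT A =====
-- '[vuln.get("type", "").lower() for vuln in ...]' (dict lookup = first match per the association-list convention)
def pvLowerTypes (vs : List (List (String × String))) : List String :=
  vs.map (fun vuln =>
    PySem.Str.lower (((vuln.find? (fun p => p.1 == "type")).map Prod.snd).getD ""))

-- A's '{vuln.get("type", "").lower() for vuln in ...}' set comprehension
def pvTypeSet (vs : List (List (String × String))) : PySem.Set String :=
  PySem.Set.ofList (pvLowerTypes vs)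

def compare_vulnerabilities_py (detected : List (List (String × String))) (expected : List (List (String × String))) : List (String × Int) :=
  let detected_types := pvTypeSet detected
  let expected_types := pvTypeSet expected
  let true_positives : Int := ((PySem.Set.inter detected_types expected_types).length : Int)
  let false_positives : Int := ((PySem.Set.diff detected_types expected_types).length : Int)
  let false_negatives : Int := ((PySem.Set.diff expected_types detected_types).length : Int)
  let true_negatives : Int := if detected_types.isEmpty && expected_types.isEmpty then 1 else 0
  [("true_positives", true_positives), ("false_positives", false_positives),
   ("false_negatives", false_negatives), ("true_negatives", true_negatives)]

-- ===== PORT B =====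
def compare_vulnerabilities_py_alt (detected : List (List (String × String))) (expected : List (List (String × String))) : List (String × Int) :=
  let status : PySem.Dict String String :=
    (pvLowerTypes detected).foldl (fun s t => s.insert t "d") PySem.Dict.empty
  let status :=
    (pvLowerTypes expected).foldl (fun s t =>
      if s.get? t == some "d" then s.insert t "b"
      else if s.contains t then s
      else s.insert t "e") status
  let tags := status.values
  [("true_positives", (tags.count "b" : Int)),
   ("false_positives", (tags.count "d" : Int)),
   ("false_negatives", (tags.count "e" : Int)),
   ("true_negatives", if status.items.isEmpty then 1 else 0)]

-- ===== PRECONDITION & SPEC =====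
def Spec_compare_vulnerabilities_py (detected : List (List (String × String))) (expected : List (List (String × String))) (out : List (String × Int)) : Prop := out = compare_vulnerabilities_py_alt detected expected
instance (detected : List (List (String × String))) (expected : List (List (String × String))) (out : List (String × Int)) : Decidable (Spec_compare_vulnerabilities_py detected expected out) := by unfold Spec_compare_vulnerabilities_py; infer_instance

-- ===== CLAIM =====
def Claim_equal_compare_vulnerabilities_py : Prop := ∀ (detected : List (List (String × String))) (expected : List (List (String × String))), Dom_compare_vulnerabilities_py detected expected → Spec_compare_vulnerabilities_py detected expected (compare_vulnerabilities_py detected expected)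

-- ===== LEMMAS AND PROOFS =====

-- a status dict whose items are 'keys S, value g': its contains / get? / insert in closed form
lemma pv_contains_mapped (S : List String) (g : String → String) (y : String) :
    (PySem.Dict.mk (S.map (fun t => (t, g t)))).contains y = decide (y ∈ S) := by
  simp only [PySem.Dict.contains, List.any_map, Function.comp_def]
  rw [List.any_beq']; simp

lemma pv_get?_mapped (S : List String) (g : String → String) (y : String) :
    (PySem.Dict.mk (S.map (fun t => (t, g t)))).get? y
      = if y ∈ S then some (g y) else none := by
  induction S with
  | nil => rfl
  | cons a S ih =>
    by_cases hay : a = y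
    · subst hay; simp [PySem.Dict.get?]
    · have hb : ((a, g a).1 == y) = false := by simp [hay]
      simp only [List.map_cons, PySem.Dict.get?, List.find?_cons, hb]
      rw [show (Option.map (fun x => x.2) (List.find? (fun p => p.1 == y) (S.map (fun t => (t, g t)))))
            = (PySem.Dict.mk (S.map (fun t => (t, g t)))).get? y from rfl, ih]
      simp [List.mem_cons, Ne.symm hay]

lemma pv_insert_mapped (S : List String) (g : String → String) (y : String) (v : String) :
    (PySem.Dict.mk (S.map (fun t => (t, g t)))).insert y v
      = PySem.Dict.mk ((PySem.Set.add S y).map (fun t => (t, if t = y then v else g t))) := by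
  rw [PySem.Dict.insert, pv_contains_mapped, PySem.Set.add]
  by_cases hy : y ∈ S
  · have hc : PySem.Set.contains S y = true := (PySem.Set.contains_iff S y).mpr hy
    simp only [hy, decide_true, if_true, hc, List.map_map]
    congr 1
    apply List.map_congr_left
    intro a _
    by_cases hay : a = y
    · subst hay; simp
    · simp [hay]
  · have hc : PySem.Set.contains S y = false := by
      rw [← Bool.not_eq_true, PySem.Set.contains_iff]; exact hy
    simp only [hy, decide_false, if_false, Bool.false_eq_true, hc, List.map_append,
      List.map_cons, List.map_nil]
    congr 2
    apply List.map_congr_left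
    intro a ha
    have : a ≠ y := fun h => hy (h ▸ ha)
    simp [this]

-- B's first loop: inserting every type with the constant tag "d"
lemma pv_fold_insert_const (xs : List String) (S : List String) :
    xs.foldl (fun (s : PySem.Dict String String) t => s.insert t "d")
        (PySem.Dict.mk (S.map (fun t => (t, "d"))))
      = PySem.Dict.mk ((PySem.Set.update S xs).map (fun t => (t, "d"))) := by
  induction xs generalizing S with
  | nil => rfl
  | cons y ys ih =>
    have hstep : (PySem.Dict.mk (S.map (fun t => (t, "d")))).insert y "d"
        = PySem.Dict.mk ((PySem.Set.add S y).map (fun t => (t, "d"))) := by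
      rw [pv_insert_mapped]
      congr 1
      apply List.map_congr_left
      intro a _
      by_cases hay : a = y <;> simp [hay]
    simp only [List.foldl_cons, hstep, ih, PySem.Set.update]

-- the tag of a type after B's second loop, as a function of the input
def pvTag (S : List String) (g : String → String) (ys : List String) (t : String) : String :=
  if t ∈ ys then (if t ∈ S then (if g t = "d" then "b" else g t) else "e") else g t

-- B's second loop on a status dict of shape (S, g)
lemma pv_fold_status (ys : List String) (S : List String) (g : String → String) :
    ys.foldl (fun (s : PySem.Dict String String) t =>
        if s.get? t == some "d" then s.insert t "b"
        else if s.contains t then s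
        else s.insert t "e")
      (PySem.Dict.mk (S.map (fun t => (t, g t))))
    = PySem.Dict.mk ((PySem.Set.update S ys).map (fun t => (t, pvTag S g ys t))) := by
  induction ys generalizing S g with
  | nil =>
    simp only [List.foldl_nil, PySem.Set.update, pvTag, List.not_mem_nil, if_false]
  | cons y ys ih =>
    simp only [List.foldl_cons, pv_get?_mapped, pv_contains_mapped]
    by_cases hyS : y ∈ S
    · have hadd : PySem.Set.add S y = S := by
        rw [PySem.Set.add, if_pos ((PySem.Set.contains_iff S y).mpr hyS)]
      by_cases hgd : g y = "d"
      · rw [if_pos (by simp [hyS, hgd]), pv_insert_mapped, hadd, ih]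
        have hupd : PySem.Set.update S (y :: ys) = PySem.Set.update S ys := by
          rw [PySem.Set.update, List.foldl_cons, hadd]; rfl
        rw [hupd]
        congr 1
        apply List.map_congr_left
        intro t _
        by_cases hty : t = y
        · subst hty
          by_cases hts : t ∈ ys <;> simp [pvTag, hts, hyS, hgd]
        · simp only [pvTag, List.mem_cons, hty, false_or]
          by_cases hts : t ∈ ys <;> simp [hts]
      · rw [if_neg (by simp [hyS, hgd]), if_pos (by simp [hyS]), ih]
        have hupd : PySem.Set.update S (y :: ys) = PySem.Set.update S ys := by
          rw [PySem.Set.update, List.foldl_cons, hadd]; rfl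
        rw [hupd]
        congr 1
        apply List.map_congr_left
        intro t _
        by_cases hty : t = y
        · subst hty
          by_cases hts : t ∈ ys <;> simp [pvTag, hts, hyS, hgd]
        · simp only [pvTag, List.mem_cons, hty, false_or]
    · have hadd : PySem.Set.add S y = S ++ [y] := by
        rw [PySem.Set.add, if_neg]
        rw [PySem.Set.contains_iff]; exact hyS
      rw [if_neg (by simp [hyS]), if_neg (by simp [hyS]), pv_insert_mapped, hadd, ih]
      have hupd : PySem.Set.update S (y :: ys) = PySem.Set.update (S ++ [y]) ys := by
        rw [PySem.Set.update, List.foldl_cons, hadd]; rfl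
      rw [hupd]
      congr 1
      apply List.map_congr_left
      intro t _
      by_cases hty : t = y
      · subst hty
        by_cases hts : t ∈ ys <;> simp [pvTag, hts, hyS]
      · simp [pvTag, List.mem_cons, List.mem_append, hty]

-- Set.contains as decidable membership
lemma pv_contains_eq (s : PySem.Set String) (t : String) :
    PySem.Set.contains s t = decide (t ∈ s) := by
  by_cases h : t ∈ s
  · simp [h]
  · have hc : PySem.Set.contains s t = false := by
      rw [← Bool.not_eq_true, PySem.Set.contains_iff]; exact h
    simp [h]

-- the three tag counts over the merged key list equal A's set-algebra sizes
lemma pv_count_tp (dt : PySem.Set String) (e : List String) :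
    (PySem.Set.update dt e).countP
        (fun t => PySem.Set.contains dt t && PySem.Set.contains (PySem.Set.ofList e) t)
      = (PySem.Set.inter dt (PySem.Set.ofList e)).length := by
  have hu : PySem.Set.update dt e = dt ++ (PySem.Set.ofList e).filter (fun y => !(PySem.Set.contains dt y)) :=
    PySem.Set.update_eq_append_filter dt e
  have hdt_mem : ∀ x ∈ dt, PySem.Set.contains dt x = true := by
    intro x hx; simpa [PySem.Set.contains_iff] using hx
  have hfil : ∀ x ∈ (PySem.Set.ofList e).filter (fun y => !(PySem.Set.contains dt y)), PySem.Set.contains dt x = false := by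
    intro x hx
    have := List.of_mem_filter hx
    simpa using this
  rw [hu, List.countP_append]
  have h1 : dt.countP (fun t => PySem.Set.contains dt t && PySem.Set.contains (PySem.Set.ofList e) t)
      = dt.countP (fun t => PySem.Set.contains (PySem.Set.ofList e) t) := by
    apply List.countP_congr; intro x hx; simp only [hdt_mem x hx, Bool.true_and]
  have h2 : ((PySem.Set.ofList e).filter (fun y => !(PySem.Set.contains dt y))).countP
      (fun t => PySem.Set.contains dt t && PySem.Set.contains (PySem.Set.ofList e) t) = 0 := by
    apply List.countP_eq_zero.mpr; intro x hx
    simp only [hfil x hx, Bool.false_and, Bool.false_eq_true, not_false_eq_true]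
  have h3 : PySem.Set.inter dt (PySem.Set.ofList e)
      = dt.filter (fun t => PySem.Set.contains (PySem.Set.ofList e) t) := rfl
  rw [h1, h2, h3, ← List.countP_eq_length_filter]
  omega

lemma pv_count_fp (dt : PySem.Set String) (e : List String) :
    (PySem.Set.update dt e).countP
        (fun t => PySem.Set.contains dt t && !PySem.Set.contains (PySem.Set.ofList e) t)
      = (PySem.Set.diff dt (PySem.Set.ofList e)).length := by
  have hu : PySem.Set.update dt e = dt ++ (PySem.Set.ofList e).filter (fun y => !(PySem.Set.contains dt y)) :=
    PySem.Set.update_eq_append_filter dt e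
  have hdt_mem : ∀ x ∈ dt, PySem.Set.contains dt x = true := by
    intro x hx; simpa [PySem.Set.contains_iff] using hx
  have hfil : ∀ x ∈ (PySem.Set.ofList e).filter (fun y => !(PySem.Set.contains dt y)), PySem.Set.contains dt x = false := by
    intro x hx
    have := List.of_mem_filter hx
    simpa using this
  rw [hu, List.countP_append]
  have h1 : dt.countP (fun t => PySem.Set.contains dt t && !PySem.Set.contains (PySem.Set.ofList e) t)
      = dt.countP (fun t => !PySem.Set.contains (PySem.Set.ofList e) t) := by
    apply List.countP_congr; intro x hx; simp only [hdt_mem x hx, Bool.true_and]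
  have h2 : ((PySem.Set.ofList e).filter (fun y => !(PySem.Set.contains dt y))).countP
      (fun t => PySem.Set.contains dt t && !PySem.Set.contains (PySem.Set.ofList e) t) = 0 := by
    apply List.countP_eq_zero.mpr; intro x hx
    simp only [hfil x hx, Bool.false_and, Bool.false_eq_true, not_false_eq_true]
  have h3 : PySem.Set.diff dt (PySem.Set.ofList e)
      = dt.filter (fun t => !PySem.Set.contains (PySem.Set.ofList e) t) := rfl
  rw [h1, h2, h3, ← List.countP_eq_length_filter]
  omega

lemma pv_count_fn (dt : PySem.Set String) (e : List String) :
    (PySem.Set.update dt e).countP (fun t => !PySem.Set.contains dt t)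
      = (PySem.Set.diff (PySem.Set.ofList e) dt).length := by
  have hu : PySem.Set.update dt e = dt ++ (PySem.Set.ofList e).filter (fun y => !(PySem.Set.contains dt y)) :=
    PySem.Set.update_eq_append_filter dt e
  have hdt_mem : ∀ x ∈ dt, PySem.Set.contains dt x = true := by
    intro x hx; simpa [PySem.Set.contains_iff] using hx
  have hfil : ∀ x ∈ (PySem.Set.ofList e).filter (fun y => !(PySem.Set.contains dt y)), PySem.Set.contains dt x = false := by
    intro x hx
    have := List.of_mem_filter hx
    simpa using this
  rw [hu, List.countP_append]
  have h1 : dt.countP (fun t => !PySem.Set.contains dt t) = 0 := by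
    apply List.countP_eq_zero.mpr; intro x hx
    simp only [hdt_mem x hx, Bool.not_true, Bool.false_eq_true, not_false_eq_true]
  have h2 : ((PySem.Set.ofList e).filter (fun y => !(PySem.Set.contains dt y))).countP
      (fun t => !PySem.Set.contains dt t)
      = ((PySem.Set.ofList e).filter (fun y => !(PySem.Set.contains dt y))).length := by
    apply List.countP_eq_length.mpr; intro x hx; simp only [hfil x hx, Bool.not_false]
  have h3 : PySem.Set.diff (PySem.Set.ofList e) dt
      = (PySem.Set.ofList e).filter (fun y => !(PySem.Set.contains dt y)) := rfl
  rw [h1, h2, h3]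
  omega

-- the merged key list is empty iff both type sets are
lemma pv_update_isEmpty (dt : PySem.Set String) (e : List String) :
    (PySem.Set.update dt e).isEmpty = (dt.isEmpty && (PySem.Set.ofList e).isEmpty) := by
  rw [PySem.Set.update_eq_append_filter]
  cases dt with
  | cons a s => simp
  | nil =>
    simp only [List.nil_append, List.isEmpty_nil, Bool.true_and]
    have h : ∀ x ∈ PySem.Set.ofList e, (!PySem.Set.contains ([] : PySem.Set String) x) = true := by
      intro x _
      rfl
    rw [List.filter_eq_self.mpr h]

-- ===== VERDICT =====
theorem compare_vulnerabilities_py_spec : Claim_equal_compare_vulnerabilities_py := by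
  intro detected expected _
  unfold Spec_compare_vulnerabilities_py compare_vulnerabilities_py compare_vulnerabilities_py_alt pvTypeSet
  simp only []
  have h0 : (PySem.Dict.empty : PySem.Dict String String)
      = PySem.Dict.mk ((([] : List String)).map (fun t => (t, "d"))) := rfl
  rw [h0, pv_fold_insert_const]
  have h1 : PySem.Set.update ([] : List String) (pvLowerTypes detected)
      = PySem.Set.ofList (pvLowerTypes detected) := by
    rw [PySem.Set.update]
    exact (PySem.Set.ofList_eq_foldl _).symm
  rw [h1]
  have h2 := pv_fold_status (pvLowerTypes expected) (PySem.Set.ofList (pvLowerTypes detected))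
      (fun _ => "d")
  beta_reduce at h2
  rw [h2]
  set dt := PySem.Set.ofList (pvLowerTypes detected) with hdt
  set el := pvLowerTypes expected with hel
  set et := PySem.Set.ofList el with het
  set U := PySem.Set.update dt el with hU
  have hmemU : ∀ t ∈ U, t ∈ dt ∨ t ∈ el := by
    intro t ht
    rw [hU, PySem.Set.update_eq_append_filter] at ht
    rcases List.mem_append.mp ht with h | h
    · exact Or.inl h
    · exact Or.inr ((PySem.Set.mem_ofList el t).mp (List.mem_filter.mp h).1)
  have hvals : (PySem.Dict.mk (U.map (fun t => (t, pvTag dt (fun _ => "d") el t)))).values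
      = U.map (fun t => pvTag dt (fun _ => "d") el t) := by
    simp [PySem.Dict.values]
  simp only [hvals, List.count_eq_countP, List.countP_map,
    List.isEmpty_map]
  have htag : ∀ t ∈ U, pvTag dt (fun _ => "d") el t
      = if t ∈ el then (if t ∈ dt then "b" else "e") else "d" := by
    intro t _
    simp [pvTag]
  have hb : U.countP ((fun x => x == "b") ∘ fun t => pvTag dt (fun _ => "d") el t)
      = U.countP (fun t => PySem.Set.contains dt t && PySem.Set.contains et t) := by
    apply List.countP_congr
    intro t ht
    simp only [Function.comp, htag t ht, pv_contains_eq, het, PySem.Set.mem_ofList]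
    rcases hmemU t ht with h | h <;>
      by_cases h1 : t ∈ el <;> by_cases h2 : t ∈ dt <;> simp_all
  have hd : U.countP ((fun x => x == "d") ∘ fun t => pvTag dt (fun _ => "d") el t)
      = U.countP (fun t => PySem.Set.contains dt t && !PySem.Set.contains et t) := by
    apply List.countP_congr
    intro t ht
    simp only [Function.comp, htag t ht, pv_contains_eq, het, PySem.Set.mem_ofList]
    rcases hmemU t ht with h | h <;>
      by_cases h1 : t ∈ el <;> by_cases h2 : t ∈ dt <;> simp_all
  have he : U.countP ((fun x => x == "e") ∘ fun t => pvTag dt (fun _ => "d") el t)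
      = U.countP (fun t => !PySem.Set.contains dt t) := by
    apply List.countP_congr
    intro t ht
    simp only [Function.comp, htag t ht, pv_contains_eq]
    rcases hmemU t ht with h | h <;>
      by_cases h1 : t ∈ el <;> by_cases h2 : t ∈ dt <;> simp_all
  rw [hb, hd, he, hU, het, pv_count_tp, pv_count_fp, pv_count_fn, pv_update_isEmpty]
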